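-- pv_equiv track=rewrite | github.com/bcolloran/deep_rl_experiments | evolution_and_random_search/standardizing_mlp_agent.py | weight_and_bias_indices
-- ===== SOURCE A (Python) =====
-- def weight_and_bias_indices(layer_sizes):
--     # layer_sizes = [size_in] + sizes_hidden + [size_out]
--     weight_inds = []
--     bias_inds = []
--
--     index_so_far = 0
--     for i in range(len(layer_sizes) - 1):
--         # weight matrix
--         weight_size = layer_sizes[i] * layer_sizes[i + 1]
--         weight_inds.append((index_so_far, index_so_far + weight_size))
--         index_so_far += weight_size
--         # bias vector
--         bias_size = layer_sizes[i + 1]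
--         bias_inds.append((index_so_far, index_so_far + bias_size))
--         index_so_far += bias_size
--
--     return weight_inds, bias_inds
-- ===== SOURCE B (Python) =====
-- def weight_and_bias_indices(layer_sizes):
--     # interleaved segment sizes: weight, bias, weight, bias, ...
--     sizes = []
--     for a, b in zip(layer_sizes, layer_sizes[1:]):
--         sizes.append(a * b)
--         sizes.append(b)
--     # cumulative offsets seeded at 0
--     offsets = [0]
--     for s in sizes:
--         offsets.append(offsets[-1] + s)
--     # consecutive-offset ranges, distributed by parity
--     ranges = list(zip(offsets, offsets[1:]))
--     weight_inds = []
--     bias_inds = []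
--     for j, r in enumerate(ranges):
--         if j % 2 == 0:
--             weight_inds.append(r)
--         else:
--             bias_inds.append(r)
--     return weight_inds, bias_inds
-- ===== Notes on version B (the rewrite author's own statement) =====
-- stated objective: alternative
-- what changed: Replaces A's single loop with a running index_so_far by a pipeline: build the interleaved weight/bias segment-size list from zipped adjacent layer pairs, accumulate cumulative offsets seeded at 0, zip consecutive offsets into ranges, and distribute the ranges by index parity (even -> weight_inds, odd -> bias_inds).
import Mathlib
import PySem

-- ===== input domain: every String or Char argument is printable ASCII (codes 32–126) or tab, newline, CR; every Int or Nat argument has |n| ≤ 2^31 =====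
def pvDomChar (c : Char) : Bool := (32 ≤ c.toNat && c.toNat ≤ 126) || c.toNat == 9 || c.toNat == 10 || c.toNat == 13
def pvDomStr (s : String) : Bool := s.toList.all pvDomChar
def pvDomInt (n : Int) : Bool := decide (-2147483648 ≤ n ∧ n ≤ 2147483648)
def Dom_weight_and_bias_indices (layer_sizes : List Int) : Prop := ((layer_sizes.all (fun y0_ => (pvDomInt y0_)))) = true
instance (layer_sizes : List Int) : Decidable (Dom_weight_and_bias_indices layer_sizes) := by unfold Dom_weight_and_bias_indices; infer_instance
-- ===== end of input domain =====

-- B replaces A's single running-offset loop by a different decomposition: build the interleaved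
-- segment-size list, accumulate offsets, zip consecutive offsets into ranges, split by parity
-- (objective: alternative; same cost).

-- ===== PORT A =====
-- one iteration of A's for-loop: state = (weight_inds, bias_inds, index_so_far)
def pvStepA (ls : List Int) (st : List (Int × Int) × List (Int × Int) × Int) (i : Int) :
    List (Int × Int) × List (Int × Int) × Int :=
  let weight_size := PySem.List.pyGetD ls i 0 * PySem.List.pyGetD ls (i + 1) 0
  let w := st.1 ++ [(st.2.2, st.2.2 + weight_size)]
  let k := st.2.2 + weight_size
  let bias_size := PySem.List.pyGetD ls (i + 1) 0
  (w, st.2.1 ++ [(k, k + bias_size)], k + bias_size)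

def weight_and_bias_indices (layer_sizes : List Int) : (List (Int × Int)) × (List (Int × Int)) :=
  let st := (PySem.List.pyRange 0 (PySem.List.len layer_sizes - 1) 1).foldl (pvStepA layer_sizes) ([], [], 0)
  (st.1, st.2.1)

-- ===== PORT B =====
-- parity dispatch of one enumerated range
def pvStepPar (wb : List (Int × Int) × List (Int × Int)) (jr : Int × (Int × Int)) :
    List (Int × Int) × List (Int × Int) :=
  if PySem.Int.mod jr.1 2 = 0 then (wb.1 ++ [jr.2], wb.2) else (wb.1, wb.2 ++ [jr.2])

def weight_and_bias_indices_alt (layer_sizes : List Int) : (List (Int × Int)) × (List (Int × Int)) :=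
  let sizes := (layer_sizes.zip (PySem.List.slice layer_sizes (some 1) none)).foldl
    (fun acc p => acc ++ [p.1 * p.2, p.2]) []
  let offsets := sizes.foldl (fun os s => os ++ [PySem.List.pyGetD os (-1) 0 + s]) ([0] : List Int)
  let ranges := offsets.zip (PySem.List.slice offsets (some 1) none)
  (PySem.List.enumerate ranges 0).foldl pvStepPar ([], [])

-- ===== PRECONDITION & SPEC =====
def Spec_weight_and_bias_indices (layer_sizes : List Int) (out : (List (Int × Int)) × (List (Int × Int))) : Prop := out = weight_and_bias_indices_alt layer_sizes
instance (layer_sizes : List Int) (out : (List (Int × Int)) × (List (Int × Int))) : Decidable (Spec_weight_and_bias_indices layer_sizes out) := by unfold Spec_weight_and_bias_indices; infer_instance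

-- ===== CLAIM (what is proved, stated in full; the proofs are below) =====
def Claim_equal_weight_and_bias_indices : Prop := ∀ (layer_sizes : List Int), Dom_weight_and_bias_indices layer_sizes → Spec_weight_and_bias_indices layer_sizes (weight_and_bias_indices layer_sizes)

-- ===== LEMMAS AND PROOFS =====

-- the common mathematical content of both programs: the two index-range lists from offset k
def pvSeg : Int → List Int → List (Int × Int) × List (Int × Int)
  | _, [] => ([], [])
  | _, [_] => ([], [])
  | k, a :: b :: rest =>
    let r := pvSeg (k + a * b + b) (b :: rest)
    ((k, k + a * b) :: r.1, (k + a * b, k + a * b + b) :: r.2)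

-- final value of A's index_so_far
def pvEnd : Int → List Int → Int
  | k, [] => k
  | k, [_] => k
  | k, a :: b :: rest => pvEnd (k + a * b + b) (b :: rest)

lemma pvGetD_cons_succ (x : Int) (xs : List Int) (i : Int) (h : 0 ≤ i) :
    PySem.List.pyGetD (x :: xs) (i + 1) 0 = PySem.List.pyGetD xs i 0 := by
  obtain ⟨n, rfl⟩ : ∃ n : Nat, i = (n : Int) := ⟨i.toNat, (Int.toNat_of_nonneg h).symm⟩
  have : ((n : Int) + 1) = ((n + 1 : Nat) : Int) := by push_cast; ring
  rw [this, PySem.List.pyGetD_natCast, PySem.List.pyGetD_natCast]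
  simp

lemma pvShift {σ : Type} (f : σ → Int → σ) (s : σ) (n : Nat) :
    List.foldl f s (PySem.List.pyRange 1 ((n : Int) + 1) 1)
      = List.foldl (fun st i => f st (i + 1)) s (PySem.List.pyRange 0 (n : Int) 1) := by
  induction n with
  | zero =>
    rw [PySem.List.pyRange_one_eq_nil (by norm_num), PySem.List.pyRange_one_eq_nil (by norm_num)]
    rfl
  | succ n ih =>
    have h1 : ((n + 1 : Nat) : Int) + 1 = ((n : Int) + 1) + 1 := by push_cast; ring
    have h2 : ((n + 1 : Nat) : Int) = (n : Int) + 1 := by push_cast; ring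
    rw [h1, h2]
    rw [show PySem.List.pyRange 0 ((n : Int) + 1) 1 = PySem.List.pyRange 0 (n : Int) 1 ++ [(n : Int)] from
      PySem.List.pyRange_one_succ_right (by omega)]
    rw [show PySem.List.pyRange 1 (((n : Int) + 1) + 1) 1 = PySem.List.pyRange 1 ((n : Int) + 1) 1 ++ [(n : Int) + 1] from
      PySem.List.pyRange_one_succ_right (by omega)]
    rw [List.foldl_append, List.foldl_append, ih]
    rfl

lemma pvA_loop : ∀ (ls : List Int) (k : Int) (w bi : List (Int × Int)),
    (PySem.List.pyRange 0 (PySem.List.len ls - 1) 1).foldl (pvStepA ls) (w, bi, k)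
      = (w ++ (pvSeg k ls).1, bi ++ (pvSeg k ls).2, pvEnd k ls) := by
  intro ls
  induction ls with
  | nil =>
    intro k w bi
    rw [PySem.List.pyRange_one_eq_nil (by norm_num [PySem.List.len_eq])]
    simp [pvSeg, pvEnd]
  | cons a tl ih =>
    intro k w bi
    cases tl with
    | nil =>
      rw [PySem.List.pyRange_one_eq_nil (by norm_num [PySem.List.len_eq])]
      simp [pvSeg, pvEnd]
    | cons b rest =>
      have hlen : PySem.List.len (a :: b :: rest) - 1 = ((rest.length : Int) + 1) := by
        simp [PySem.List.len_eq]
      rw [hlen, PySem.List.pyRange_one_cons (by omega), List.foldl_cons]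
      have hstep0 : pvStepA (a :: b :: rest) (w, bi, k) 0
          = (w ++ [(k, k + a * b)], bi ++ [(k + a * b, k + a * b + b)], k + a * b + b) := by
        have h1 : PySem.List.pyGetD (a :: b :: rest) ((0 : Int) + 1) 0 = b := by
          rw [pvGetD_cons_succ _ _ _ (by omega)]; simp [PySem.List.pyGetD_zero_cons]
        simp only [pvStepA, h1, PySem.List.pyGetD_zero_cons]
      rw [hstep0, show (0 : Int) + 1 = 1 from by ring, pvShift]
      have hcongr : List.foldl (fun st i => pvStepA (a :: b :: rest) st (i + 1))
            (w ++ [(k, k + a * b)], bi ++ [(k + a * b, k + a * b + b)], k + a * b + b)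
            (PySem.List.pyRange 0 (rest.length : Int) 1)
          = List.foldl (pvStepA (b :: rest))
            (w ++ [(k, k + a * b)], bi ++ [(k + a * b, k + a * b + b)], k + a * b + b)
            (PySem.List.pyRange 0 (rest.length : Int) 1) := by
        apply PySem.List.foldl_congr_mem
        intro st i hi
        have hb := (PySem.List.mem_pyRange_one.mp hi)
        have h0 : 0 ≤ i := hb.1
        simp only [pvStepA, pvGetD_cons_succ _ _ _ h0, pvGetD_cons_succ _ _ _ (by omega : (0:Int) ≤ i + 1)]
      rw [hcongr]
      rw [show (rest.length : Int) = PySem.List.len (b :: rest) - 1 from by simp [PySem.List.len_eq], ih]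
      simp [pvSeg, pvEnd]

lemma pvA_eq (ls : List Int) :
    weight_and_bias_indices ls = ((pvSeg 0 ls).1, (pvSeg 0 ls).2) := by
  unfold weight_and_bias_indices
  rw [pvA_loop]
  simp

-- B-side characterizations
def pvSizes (ls : List Int) : List Int :=
  (ls.zip ls.tail).flatMap (fun p => [p.1 * p.2, p.2])

def pvOffs : Int → List Int → List Int
  | k, [] => [k]
  | k, s :: l => k :: pvOffs (k + s) l

def pvRanges : Int → List Int → List (Int × Int)
  | _, [] => []
  | k, s :: l => (k, k + s) :: pvRanges (k + s) l

lemma pvOffs_fold : ∀ (l : List Int) (os : List Int) (k : Int),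
    l.foldl (fun os s => os ++ [PySem.List.pyGetD os (-1) 0 + s]) (os ++ [k]) = os ++ pvOffs k l := by
  intro l
  induction l with
  | nil => intro os k; simp [pvOffs]
  | cons s l ih =>
    intro os k
    rw [List.foldl_cons]
    have h : (os ++ [k]) ++ [PySem.List.pyGetD (os ++ [k]) (-1) 0 + s] = (os ++ [k]) ++ [k + s] := by
      rw [PySem.List.pyGetD_neg_one_append_singleton]
    rw [h, ih (os ++ [k]) (k + s)]
    simp [pvOffs]

lemma pvOffs_head (k : Int) (l : List Int) : ∃ Y, pvOffs k l = k :: Y := by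
  cases l <;> exact ⟨_, rfl⟩

lemma pvZip_offs : ∀ (l : List Int) (k : Int),
    (pvOffs k l).zip (pvOffs k l).tail = pvRanges k l := by
  intro l
  induction l with
  | nil => intro k; simp [pvOffs, pvRanges]
  | cons s l ih =>
    intro k
    obtain ⟨Y, hY⟩ := pvOffs_head (k + s) l
    have := ih (k + s)
    rw [hY] at this
    simp only [List.tail_cons] at this
    show (k :: pvOffs (k + s) l).zip (pvOffs (k + s) l) = pvRanges k (s :: l)
    rw [hY]
    simpa [pvRanges] using this

lemma pvB_par : ∀ (ls : List Int) (k m : Int) (w bi : List (Int × Int)),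
    (PySem.List.enumerate (pvRanges k (pvSizes ls)) (2 * m)).foldl pvStepPar (w, bi)
      = (w ++ (pvSeg k ls).1, bi ++ (pvSeg k ls).2) := by
  intro ls
  induction ls with
  | nil => intro k m w bi; simp [pvSizes, pvRanges, pvSeg, PySem.List.enumerate_nil]
  | cons a tl ih =>
    intro k m w bi
    cases tl with
    | nil => simp [pvSizes, pvRanges, pvSeg, PySem.List.enumerate_nil]
    | cons b rest =>
      have hsz : pvSizes (a :: b :: rest) = a * b :: b :: pvSizes (b :: rest) := by
        simp [pvSizes]
      rw [hsz]
      show (PySem.List.enumerate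
          ((k, k + a * b) :: (k + a * b, k + a * b + b) :: pvRanges (k + a * b + b) (pvSizes (b :: rest)))
          (2 * m)).foldl pvStepPar (w, bi) = _
      rw [PySem.List.enumerate_cons, PySem.List.enumerate_cons, List.foldl_cons, List.foldl_cons]
      have hstep : pvStepPar (pvStepPar (w, bi) (2 * m, (k, k + a * b)))
            (2 * m + 1, (k + a * b, k + a * b + b))
          = (w ++ [(k, k + a * b)], bi ++ [(k + a * b, k + a * b + b)]) := by
        simp [pvStepPar]
      rw [hstep]
      have h2 : 2 * m + 1 + 1 = 2 * (m + 1) := by ring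
      rw [h2, ih (k + a * b + b) (m + 1)]
      simp [pvSeg]

lemma pvB_eq (ls : List Int) :
    weight_and_bias_indices_alt ls = ((pvSeg 0 ls).1, (pvSeg 0 ls).2) := by
  have hsz : (ls.zip (PySem.List.slice ls (some 1) none)).foldl
      (fun acc p => acc ++ [p.1 * p.2, p.2]) ([] : List Int) = pvSizes ls := by
    rw [PySem.List.slice_from_one, PySem.List.foldl_append_eq_flatMap]
    simp [pvSizes]
  have hoff : (pvSizes ls).foldl (fun os s => os ++ [PySem.List.pyGetD os (-1) 0 + s])
      ([0] : List Int) = pvOffs 0 (pvSizes ls) := by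
    simpa using pvOffs_fold (pvSizes ls) [] 0
  have hr : (pvOffs 0 (pvSizes ls)).zip
      (PySem.List.slice (pvOffs 0 (pvSizes ls)) (some 1) none) = pvRanges 0 (pvSizes ls) := by
    rw [PySem.List.slice_from_one]; exact pvZip_offs _ 0
  have hp := pvB_par ls 0 0 [] []
  rw [mul_zero] at hp
  simp only [List.nil_append] at hp
  unfold weight_and_bias_indices_alt
  simp only [hsz, hoff, hr]
  exact hp

-- ===== VERDICT (by name: the statement is the Claim_ definition above) =====
theorem weight_and_bias_indices_spec : Claim_equal_weight_and_bias_indices := by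
  intro ls _
  show weight_and_bias_indices ls = weight_and_bias_indices_alt ls
  rw [pvA_eq, pvB_eq]
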